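-- pv_equiv track=rewrite | github.com/kevin7637/IVS | aa.py | solution
-- ===== SOURCE A (Python) =====
-- def solution(keymap, targets):
--     answer = []
--     dict_key = {}
--     for i in range(len(keymap)):
--         for index, value in enumerate(keymap[i]):
--             if value in dict_key:
--                 dict_key[value] = min(index, dict_key[value])
--             else:
--                 dict_key[value] = index
--     for word in targets:
--         result = 0
--         for spell in word:
--             if spell not in dict_key:
--                 result = -1
--                 break
--             else:
--                 result += (dict_key[spell] + 1)
--         answer.append(result)
--     return answer
-- ===== SOURCE B (Python) =====
-- def solution(keymap, targets):
--     answer = []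
--     for word in targets:
--         result = 0
--         for ch in word:
--             positions = [row.index(ch) + 1 for row in keymap if ch in row]
--             if not positions:
--                 result = -1
--                 break
--             result += min(positions)
--         answer.append(result)
--     return answer
-- ===== Notes on version B (the rewrite author's own statement) =====
-- stated objective: simpler
-- what changed: Drops A's precomputed min-index dict entirely: B scans the keymap rows per target character, collecting row.index(ch)+1 for rows containing ch and adding the minimum (-1 and break when none).
import Mathlib
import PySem

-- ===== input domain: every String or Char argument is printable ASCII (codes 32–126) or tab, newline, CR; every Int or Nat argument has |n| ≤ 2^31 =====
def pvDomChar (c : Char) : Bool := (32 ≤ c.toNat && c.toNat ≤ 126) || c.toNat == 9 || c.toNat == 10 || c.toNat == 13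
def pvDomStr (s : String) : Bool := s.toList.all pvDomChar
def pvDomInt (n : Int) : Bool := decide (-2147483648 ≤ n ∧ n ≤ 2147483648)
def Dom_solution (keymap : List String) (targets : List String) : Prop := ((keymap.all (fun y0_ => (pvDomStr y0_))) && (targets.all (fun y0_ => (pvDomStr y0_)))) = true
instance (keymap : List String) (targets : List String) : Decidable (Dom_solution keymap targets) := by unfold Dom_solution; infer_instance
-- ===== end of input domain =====

-- B replaces A's precomputed min-index dict by a per-character scan of the keymap rows (simpler, no faster).

-- ===== PORT A =====
-- one row of A's dict-building pass: for index, value in enumerate(row): dict update with min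
def pvRowFold (d : PySem.Dict Char Int) (row : List Char) : PySem.Dict Char Int :=
  (PySem.List.enumerate row 0).foldl
    (fun d p =>
      match d.get? p.2 with
      | some old => d.insert p.2 (min p.1 old)
      | none => d.insert p.2 p.1) d

-- the 'for spell in word' loop with its break (result = -1; break)
def pvLoopA (d : PySem.Dict Char Int) : List Char → Int → Int
  | [], r => r
  | c :: cs, r =>
    match d.get? c with
    | none => -1
    | some v => pvLoopA d cs (r + (v + 1))

-- 'for i in range(len(keymap)): … keymap[i] …' walks exactly the rows of keymap in order
def solution (keymap : List String) (targets : List String) : List Int :=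
  let d := keymap.foldl (fun d s => pvRowFold d s.toList) PySem.Dict.empty
  targets.foldl (fun ans w => ans ++ [pvLoopA d w.toList 0]) []

-- ===== PORT B =====
-- positions = [row.index(ch) + 1 for row in keymap if ch in row]  ('ch in row' for a single char is membership)
def pvPositions (keymap : List String) (c : Char) : List Int :=
  (keymap.filter (fun row => row.toList.contains c)).map
    (fun row => (((PySem.List.index? row.toList c).getD 0 : Nat) : Int) + 1)

-- the 'for ch in word' loop with its break
def pvLoopB (keymap : List String) : List Char → Int → Int
  | [], r => r
  | c :: cs, r =>
    match PySem.List.min? (pvPositions keymap c) (fun x => x) with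
    | none => -1
    | some m => pvLoopB keymap cs (r + m)

def solution_alt (keymap : List String) (targets : List String) : List Int :=
  targets.foldl (fun ans w => ans ++ [pvLoopB keymap w.toList 0]) []

-- ===== PRECONDITION & SPEC =====
def Spec_solution (keymap : List String) (targets : List String) (out : List Int) : Prop := out = solution_alt keymap targets
instance (keymap : List String) (targets : List String) (out : List Int) : Decidable (Spec_solution keymap targets out) := by unfold Spec_solution; infer_instance

-- ===== CLAIM (what is proved, stated in full; the proofs are below) =====
def Claim_equal_solution : Prop := ∀ (keymap : List String) (targets : List String), Dom_solution keymap targets → Spec_solution keymap targets (solution keymap targets)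

-- ===== LEMMAS AND PROOFS =====

-- proof helpers
def pvOmin (o : Option Int) (n : Int) : Int := match o with | none => n | some v => min n v

-- first index of c in each keymap row that contains it, as Int, in row order
def pvMins (keymap : List String) (c : Char) : List Int :=
  keymap.filterMap (fun row => (PySem.List.index? row.toList c).map (fun n => ((n : Nat) : Int)))

theorem pvRowStep (row : List Char) (s : Int) (d : PySem.Dict Char Int) (c : Char) :
    ((PySem.List.enumerate row s).foldl
      (fun d p =>
        match d.get? p.2 with
        | some old => d.insert p.2 (min p.1 old)
        | none => d.insert p.2 p.1) d).get? c =
    match PySem.List.index? row c with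
    | none => d.get? c
    | some k => some (pvOmin (d.get? c) (s + k)) := by
  induction row generalizing s d with
  | nil => simp [PySem.List.enumerate_nil, PySem.List.index?]
  | cons x t ih =>
    rw [PySem.List.enumerate_cons]
    simp only [List.foldl_cons]
    by_cases hx : x = c
    · subst hx
      rw [PySem.List.index?_cons_self]
      cases hd : d.get? x with
      | none =>
        simp only [hd]
        rw [ih (s + 1) (d.insert x s)]
        cases ht : PySem.List.index? t x with
        | none => simp [PySem.Dict.get?_insert_self, pvOmin, hd]
        | some k' =>
          simp only [PySem.Dict.get?_insert_self, pvOmin, hd]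
          have : (0 : Int) ≤ (k' : Int) := Int.natCast_nonneg k'
          simp only [Nat.cast_zero]
          congr 1
          omega
      | some old =>
        simp only [hd]
        rw [ih (s + 1) (d.insert x (min s old))]
        cases ht : PySem.List.index? t x with
        | none => simp [PySem.Dict.get?_insert_self, pvOmin, hd]
        | some k' =>
          simp only [PySem.Dict.get?_insert_self, pvOmin, hd]
          have : (0 : Int) ≤ (k' : Int) := Int.natCast_nonneg k'
          simp only [Nat.cast_zero]
          congr 1
          omega
    · have hne : c ≠ x := fun h => hx h.symm
      rw [PySem.List.index?_cons_of_ne t hx]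
      cases hd : d.get? x with
      | none =>
        simp only [hd]
        rw [ih (s + 1) (d.insert x s)]
        rw [PySem.Dict.get?_insert_of_ne d s hne]
        cases ht : PySem.List.index? t c with
        | none => simp only [ht, Option.map_none]
        | some k' =>
          simp only [ht, Option.map_some]
          congr 1
          congr 1
          push_cast
          ring
      | some old =>
        simp only [hd]
        rw [ih (s + 1) (d.insert x (min s old))]
        rw [PySem.Dict.get?_insert_of_ne d (min s old) hne]
        cases ht : PySem.List.index? t c with
        | none => simp only [ht, Option.map_none]
        | some k' =>
          simp only [ht, Option.map_some]
          congr 1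
          congr 1
          push_cast
          ring

theorem pvDictGet (keymap : List String) (d : PySem.Dict Char Int) (c : Char) :
    (keymap.foldl (fun d s => pvRowFold d s.toList) d).get? c =
    (pvMins keymap c).foldl (fun o n => some (pvOmin o n)) (d.get? c) := by
  induction keymap generalizing d with
  | nil => simp [pvMins]
  | cons r km ih =>
    simp only [List.foldl_cons, pvMins, List.filterMap_cons]
    rw [ih]
    have h := pvRowStep r.toList 0 d c
    rw [pvRowFold] at *
    cases ht : PySem.List.index? r.toList c with
    | none => simp only [ht] at h; rw [h]; rfl
    | some k =>
      simp only [ht] at h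
      rw [h]
      simp only [Option.map_some, zero_add]
      rfl

theorem pvPositions_eq (keymap : List String) (c : Char) :
    pvPositions keymap c = (pvMins keymap c).map (· + 1) := by
  induction keymap with
  | nil => rfl
  | cons r km ih =>
    have hih := ih
    simp [pvPositions, pvMins, PySem.List.index?_eq_idxOf?] at hih
    by_cases hmem : c ∈ r.toList
    · obtain ⟨k, ht⟩ := Option.isSome_iff_exists.mp ((PySem.List.index?_isSome_iff r.toList c).mpr hmem)
      have ht' : List.idxOf? c r.toList = some k := by
        rw [← PySem.List.index?_eq_idxOf?]; exact ht
      simp [pvPositions, pvMins, List.filter_cons, List.filterMap_cons, hmem, ht', hih]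
    · have ht' : List.idxOf? c r.toList = none := by
        rw [← PySem.List.index?_eq_idxOf?]
        exact (PySem.List.index?_eq_none_iff _ _).mpr hmem
      simp [pvPositions, pvMins, List.filter_cons, List.filterMap_cons, hmem, ht', hih]

theorem pvFoldSome (t : List Int) (a : Int) :
    t.foldl (fun o n => some (pvOmin o n)) (some a) = some (t.foldl min a) := by
  induction t generalizing a with
  | nil => rfl
  | cons n t ih =>
    simp only [List.foldl_cons]
    rw [show pvOmin (some a) n = min a n from min_comm n a, ih]

theorem pvFoldMinMap (t : List Int) (x : Int) :
    (t.map (· + 1)).foldl min (x + 1) = t.foldl min x + 1 := by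
  induction t generalizing x with
  | nil => rfl
  | cons n t ih =>
    simp only [List.map_cons, List.foldl_cons]
    rw [show min (x + 1) (n + 1) = min x n + 1 by omega, ih]

theorem pvMin?_map (l : List Int) :
    PySem.List.min? (l.map (· + 1)) (fun x => x) =
    (l.foldl (fun o n => some (pvOmin o n)) none).map (· + 1) := by
  cases l with
  | nil => rfl
  | cons x t =>
    simp only [List.map_cons, List.foldl_cons]
    rw [PySem.List.min?_id_cons, pvFoldMinMap]
    show _ = ((t.foldl (fun o n => some (pvOmin o n)) (some (pvOmin none x))).map (· + 1))
    rw [show pvOmin none x = x from rfl, pvFoldSome]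
    rfl

theorem pvLoop_eq (keymap : List String) (w : List Char) (r : Int) :
    pvLoopA (keymap.foldl (fun d s => pvRowFold d s.toList) PySem.Dict.empty) w r =
    pvLoopB keymap w r := by
  induction w generalizing r with
  | nil => rfl
  | cons c cs ih =>
    have hd : (keymap.foldl (fun d s => pvRowFold d s.toList) PySem.Dict.empty).get? c =
        (pvMins keymap c).foldl (fun o n => some (pvOmin o n)) none := by
      rw [pvDictGet]; rfl
    have hm : PySem.List.min? (pvPositions keymap c) (fun x => x) =
        ((pvMins keymap c).foldl (fun o n => some (pvOmin o n)) none).map (· + 1) := by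
      rw [pvPositions_eq, pvMin?_map]
    simp only [pvLoopA, pvLoopB, hd, hm]
    cases hfold : (pvMins keymap c).foldl (fun o n => some (pvOmin o n)) none with
    | none => rfl
    | some v => exact ih (r + (v + 1))

-- ===== VERDICT (by name: the statement is the Claim_ definition above) =====
theorem solution_spec : Claim_equal_solution := by
  intro keymap targets _
  unfold Spec_solution solution solution_alt
  rw [PySem.List.foldl_append_singleton_eq_map, PySem.List.foldl_append_singleton_eq_map]
  exact congrArg ([] ++ ·) (List.map_congr_left (fun w _ => pvLoop_eq keymap w.toList 0))
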